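-- pv_equiv track=rewrite | github.com/Onurcannkaya/Evrak-yonetim-sistemi | document_processor.py | _correct_numbers
-- ===== SOURCE A (Python) =====
-- def _correct_numbers(text: str, context: str = 'general') -> str:
--     """
--     Sayı context'ine göre harf-sayı karışıklıklarını düzelt.
--
--     Ada/Parsel context'inde:
--     - O, o → 0
--     - I, l → 1
--     - S, s → 5
--     - B, b → 8
--     - Z, z → 2
--
--     Args:
--         text: Düzeltilecek metin
--         context: 'ada', 'parsel', veya 'general'
--
--     Returns:
--         Düzeltilmiş metin
--     """
--     if context in ['ada', 'parsel']:
--         corrections = {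
--             'O': '0', 'o': '0',
--             'I': '1', 'l': '1',
--             'S': '5', 's': '5',
--             'B': '8', 'b': '8',
--             'Z': '2', 'z': '2',
--             'G': '6', 'g': '6',
--         }
--
--         for old, new in corrections.items():
--             text = text.replace(old, new)
--
--     return text
-- ===== SOURCE B (Python) =====
-- _KEYS = "OoIlSsBbZzGg"
-- _DIGITS = "001155882266"
--
--
-- def _correct_numbers(text: str, context: str = 'general') -> str:
--     if context not in ('ada', 'parsel'):
--         return text
--     out = []
--     for ch in text:
--         i = _KEYS.find(ch)
--         out.append(ch if i < 0 else _DIGITS[i])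
--     return ''.join(out)
-- ===== Notes on version B (the rewrite author's own statement) =====
-- stated objective: alternative
-- what changed: A makes twelve staged whole-string replace passes driven by a dict; B makes one explicit left-to-right pass with an accumulator list, classifying each character by its index in a parallel key/digit string pair (no dict, no replace, no translate); correct because no replacement digit is itself a key, so pass order never mattered.
import Mathlib
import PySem

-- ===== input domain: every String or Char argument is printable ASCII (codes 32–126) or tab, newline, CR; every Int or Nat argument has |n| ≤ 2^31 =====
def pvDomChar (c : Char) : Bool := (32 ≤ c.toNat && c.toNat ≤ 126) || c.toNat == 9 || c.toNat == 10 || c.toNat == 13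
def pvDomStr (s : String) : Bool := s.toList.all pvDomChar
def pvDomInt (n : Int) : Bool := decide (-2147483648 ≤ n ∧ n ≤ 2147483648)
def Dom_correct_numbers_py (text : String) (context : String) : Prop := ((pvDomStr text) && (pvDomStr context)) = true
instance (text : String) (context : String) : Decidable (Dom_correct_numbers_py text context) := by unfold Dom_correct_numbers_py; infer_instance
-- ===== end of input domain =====

-- B replaces A's twelve staged whole-string replace passes by one left-to-right pass with an accumulator, classifying each character by its index in parallel key/digit strings; same return value, alternative algorithm.


-- ===== PORT A =====
-- the `corrections` dict of A, in insertion order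
def pvCorrectionsA : List (String × String) :=
  [("O", "0"), ("o", "0"), ("I", "1"), ("l", "1"), ("S", "5"), ("s", "5"),
   ("B", "8"), ("b", "8"), ("Z", "2"), ("z", "2"), ("G", "6"), ("g", "6")]

def correct_numbers_py (text : String) (context : String) : String :=
  if ["ada", "parsel"].contains context then
    pvCorrectionsA.foldl (fun t p => PySem.Str.replace t p.1 p.2) text
  else
    text

-- ===== PORT B =====
-- Source B's parallel key/digit strings, as character lists
def pvKeysB : List Char := ['O', 'o', 'I', 'l', 'S', 's', 'B', 'b', 'Z', 'z', 'G', 'g']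
def pvDigitsB : List Char := ['0', '0', '1', '1', '5', '5', '8', '8', '2', '2', '6', '6']

-- Source B: early return unless context is 'ada'/'parsel', else one loop over the characters
-- appending to `out` (here: a foldl with an accumulator list), then ''.join(out)
def correct_numbers_py_alt (text : String) (context : String) : String :=
  if !(context == "ada" || context == "parsel") then
    text
  else
    String.ofList (text.toList.foldl
      (fun acc ch =>
        let i := PySem.Chars.find pvKeysB [ch]
        acc ++ [if i < 0 then ch else PySem.List.pyGetD pvDigitsB i ch]) [])

-- ===== PRECONDITION & SPEC =====
def Spec_correct_numbers_py (text : String) (context : String) (out : String) : Prop := out = correct_numbers_py_alt text context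
instance (text : String) (context : String) (out : String) : Decidable (Spec_correct_numbers_py text context out) := by unfold Spec_correct_numbers_py; infer_instance

-- ===== CLAIM (what is proved, stated in full; the proofs are below) =====
def Claim_equal_correct_numbers_py : Prop := ∀ (text : String) (context : String), Dom_correct_numbers_py text context → Spec_correct_numbers_py text context (correct_numbers_py text context)

-- ===== LEMMAS AND PROOFS =====

-- replacing the single char a by the single char b
def pvStep (a b c : Char) : Char := if c = a then b else c

-- B's per-character classification, as a function of one character
def pvClassB (ch : Char) : Char :=
  let i := PySem.Chars.find pvKeysB [ch]
  if i < 0 then ch else PySem.List.pyGetD pvDigitsB i ch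

-- the fuelled scanner of Chars.replace, for a single-char pattern, is a map
theorem replace_go_single (a b : Char) :
    ∀ (fuel : Nat) (s acc : List Char), s.length ≤ fuel →
      PySem.Chars.replace.go [a] [b] fuel s acc = acc.reverse ++ s.map (pvStep a b) := by
  intro fuel
  induction fuel with
  | zero =>
    intro s acc h
    have : s = [] := List.eq_nil_of_length_eq_zero (Nat.le_zero.mp h)
    subst this; simp [PySem.Chars.replace.go]
  | succ n ih =>
    intro s acc h
    cases s with
    | nil => simp [PySem.Chars.replace.go]
    | cons c t =>
      simp only [PySem.Chars.replace.go]
      by_cases hc : c = a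
      · subst hc
        have hp : List.isPrefixOf [c] (c :: t) = true := by
          simp [List.isPrefixOf]
        rw [if_pos hp]
        rw [show List.drop [c].length (c :: t) = t from rfl,
            show ([b].reverse ++ acc) = b :: acc from rfl,
            ih t (b :: acc) (by simpa using Nat.le_of_succ_le_succ h)]
        simp [pvStep]
      · have hp : List.isPrefixOf [a] (c :: t) = false := by
          simp [List.isPrefixOf]; exact fun h' => (hc h'.symm).elim
        rw [if_neg (by simp [hp])]
        rw [ih t (c :: acc) (by simpa using Nat.le_of_succ_le_succ h)]
        simp [pvStep, hc]

-- a replace of one char by one char is a single map over the characters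
theorem replace_single (s : List Char) (a b : Char) :
    PySem.Chars.replace s [a] [b] = s.map (pvStep a b) := by
  simp only [PySem.Chars.replace, List.isEmpty_cons, Bool.false_eq_true, if_false]
  exact replace_go_single a b s.length s [] le_rfl

-- the String-level version of replace_single
theorem strrep (s as bs : String) (a b : Char) (ha : as.toList = [a]) (hb : bs.toList = [b]) :
    PySem.Str.replace s as bs = String.ofList (s.toList.map (pvStep a b)) := by
  simp only [PySem.Str.replace, ha, hb, replace_single]

-- one character through A's twelve replacement steps = B's one classification
theorem ptwise (c : Char) : (pvStep 'g' '6' (pvStep 'G' '6' (pvStep 'z' '2' (pvStep 'Z' '2' (pvStep 'b' '8' (pvStep 'B' '8' (pvStep 's' '5' (pvStep 'S' '5' (pvStep 'l' '1' (pvStep 'I' '1' (pvStep 'o' '0' (pvStep 'O' '0' c)))))))))))) = pvClassB c := by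
  by_cases h0 : c = 'O'
  · subst h0; decide
  by_cases h1 : c = 'o'
  · subst h1; decide
  by_cases h2 : c = 'I'
  · subst h2; decide
  by_cases h3 : c = 'l'
  · subst h3; decide
  by_cases h4 : c = 'S'
  · subst h4; decide
  by_cases h5 : c = 's'
  · subst h5; decide
  by_cases h6 : c = 'B'
  · subst h6; decide
  by_cases h7 : c = 'b'
  · subst h7; decide
  by_cases h8 : c = 'Z'
  · subst h8; decide
  by_cases h9 : c = 'z'
  · subst h9; decide
  by_cases h10 : c = 'G'
  · subst h10; decide
  by_cases h11 : c = 'g'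
  · subst h11; decide
  have hmem : c ∉ pvKeysB := by
    simp [pvKeysB]
    exact ⟨h0, h1, h2, h3, h4, h5, h6, h7, h8, h9, h10, h11⟩
  have hfind : PySem.Chars.find pvKeysB [c] = -1 :=
    (PySem.Chars.find_eq_neg_one_iff pvKeysB [c]).mpr
      (fun hinf => hmem ((List.singleton_infix_iff c pvKeysB).mp hinf))
  simp only [pvClassB, hfind]
  simp only [pvStep, if_neg h0, if_neg h1, if_neg h2, if_neg h3, if_neg h4, if_neg h5, if_neg h6, if_neg h7, if_neg h8, if_neg h9, if_neg h10, if_neg h11]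
  rfl

-- A's twelve map passes collapse to one map of B's classification
theorem chain (l : List Char) :
    (List.map (pvStep 'g' '6') (List.map (pvStep 'G' '6') (List.map (pvStep 'z' '2') (List.map (pvStep 'Z' '2') (List.map (pvStep 'b' '8') (List.map (pvStep 'B' '8') (List.map (pvStep 's' '5') (List.map (pvStep 'S' '5') (List.map (pvStep 'l' '1') (List.map (pvStep 'I' '1') (List.map (pvStep 'o' '0') (List.map (pvStep 'O' '0') l)))))))))))) = l.map pvClassB := by
  induction l with
  | nil => rfl
  | cons c t ih =>
    simp only [List.map_cons]
    exact congrArg₂ List.cons (ptwise c) ih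

-- ===== VERDICT (by name: the statement is the Claim_ definition above) =====
set_option maxHeartbeats 1000000 in
theorem correct_numbers_py_spec : Claim_equal_correct_numbers_py := by
  intro text context _
  unfold Spec_correct_numbers_py correct_numbers_py correct_numbers_py_alt
  have hg : (["ada", "parsel"].contains context) = (context == "ada" || context == "parsel") := by
    simp only [List.contains, List.elem_cons, List.elem_nil]
    cases context == "ada" <;> cases context == "parsel" <;> rfl
  rw [hg]
  by_cases hctx : (context == "ada" || context == "parsel") = true
  · rw [if_pos hctx, if_neg (by simp [hctx])]
    simp only [pvCorrectionsA, List.foldl_cons, List.foldl_nil]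
    rw [strrep _ "g" "6" 'g' '6' rfl rfl]
    rw [strrep _ "G" "6" 'G' '6' rfl rfl]
    rw [strrep _ "z" "2" 'z' '2' rfl rfl]
    rw [strrep _ "Z" "2" 'Z' '2' rfl rfl]
    rw [strrep _ "b" "8" 'b' '8' rfl rfl]
    rw [strrep _ "B" "8" 'B' '8' rfl rfl]
    rw [strrep _ "s" "5" 's' '5' rfl rfl]
    rw [strrep _ "S" "5" 'S' '5' rfl rfl]
    rw [strrep _ "l" "1" 'l' '1' rfl rfl]
    rw [strrep _ "I" "1" 'I' '1' rfl rfl]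
    rw [strrep _ "o" "0" 'o' '0' rfl rfl]
    rw [strrep _ "O" "0" 'O' '0' rfl rfl]
    rw [show (fun (acc : List Char) (ch : Char) =>
          let i := PySem.Chars.find pvKeysB [ch]
          acc ++ [if i < 0 then ch else PySem.List.pyGetD pvDigitsB i ch])
        = (fun acc ch => acc ++ [pvClassB ch]) from rfl,
        PySem.List.foldl_append_singleton_eq_map pvClassB text.toList []]
    simp only [String.toList_ofList, List.nil_append]
    exact congrArg String.ofList (chain text.toList)
  · rw [if_neg hctx, if_pos (by simp [hctx])]
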